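-- pv_equiv track=rewrite | github.com/BenMabroukAya/PyCryptoLab | ProjetAyaBenMabroukCrypto.py | constVertical
-- ===== SOURCE A (Python) =====
-- def constHorizontal(cle, alphabet="ABCDEFGHIJKLMNOPQRSTUVWXYZ"):
--     cle2 = ""
--     for i in cle:
--         if i not in cle2:
--             cle2 += i
--     if 'a' not in alphabet or 'A' not in alphabet:
--         cle2 = cle2.upper()
--         alphabet = alphabet.upper()
--
--     alpha2 = cle2 + alphabet
--     alpha3 = ""
--     for i in alpha2:
--         if i not in alpha3:
--             alpha3 += i
--     return alpha3
--
-- def constVertical(cle, alphabet="ABCDEFGHIJKLMNOPQRSTUVWXYZ"):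
--     cle2 = ""
--     for i in cle:
--         if i not in cle2:
--             cle2 += i
--     if 'a' not in alphabet or 'A' not in alphabet:
--         cle = cle.upper()
--         alphabet = alphabet.upper()
--     alpha2 = ""
--     alphaH = constHorizontal(cle, alphabet)
--     for i in range(len(cle)):
--         for j in range(i, len(alphaH), len(cle)):
--             alpha2 += alphaH[j]
--     return alpha2
-- ===== SOURCE B (Python) =====
-- def constHorizontal(cle, alphabet="ABCDEFGHIJKLMNOPQRSTUVWXYZ"):
--     cle2 = ""
--     for i in cle:
--         if i not in cle2:
--             cle2 += i
--     if 'a' not in alphabet or 'A' not in alphabet: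
--         cle2 = cle2.upper()
--         alphabet = alphabet.upper()
--
--     alpha2 = cle2 + alphabet
--     alpha3 = ""
--     for i in alpha2:
--         if i not in alpha3:
--             alpha3 += i
--     return alpha3
--
-- def constVertical(cle, alphabet="ABCDEFGHIJKLMNOPQRSTUVWXYZ"):
--     if 'a' not in alphabet or 'A' not in alphabet:
--         cle = cle.upper()
--         alphabet = alphabet.upper()
--     alphaH = constHorizontal(cle, alphabet)
--     c = len(cle)
--     if c == 0:
--         return ""
--     # materialize the grid row by row, then read it column by column
--     rows = [alphaH[k:k + c] for k in range(0, len(alphaH), c)]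
--     out = []
--     for i in range(c):
--         for row in rows:
--             if i < len(row):
--                 out.append(row[i])
--     return "".join(out)
-- ===== Notes on version B (the rewrite author's own statement) =====
-- stated objective: alternative
-- what changed: A reads the transposed alphabet by stride-indexing the flat string with two nested index loops and quadratic string += accumulation; B materializes the grid as a list of row slices and reads it column by column (bounds-checked for the ragged last row) into a list joined once.
import Mathlib
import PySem

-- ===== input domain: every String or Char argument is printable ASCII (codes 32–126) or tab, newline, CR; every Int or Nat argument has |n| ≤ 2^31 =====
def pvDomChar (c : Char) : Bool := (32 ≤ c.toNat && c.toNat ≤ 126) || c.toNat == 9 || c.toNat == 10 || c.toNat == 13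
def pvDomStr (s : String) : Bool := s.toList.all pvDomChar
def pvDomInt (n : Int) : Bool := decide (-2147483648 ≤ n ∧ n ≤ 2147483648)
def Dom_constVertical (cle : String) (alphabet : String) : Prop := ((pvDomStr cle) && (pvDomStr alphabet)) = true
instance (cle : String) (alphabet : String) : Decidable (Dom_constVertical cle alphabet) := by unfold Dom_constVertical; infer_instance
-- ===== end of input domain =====

-- B reads the keyed alphabet as a materialized row grid transposed column by column, instead of
-- A's stride-indexing of the flat string with nested index loops (objective: alternative).

-- ===== PORT A =====
-- ordered first-occurrence dedup: the '' accumulator loop both Python functions start with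
def pvDedup (s : List Char) : List Char :=
  s.foldl (fun acc c => if c ∈ acc then acc else acc ++ [c]) []

-- the "if 'a' not in alphabet or 'A' not in alphabet: upper both" step shared by both functions
def pvCaseFold (s : List Char) (alphabet : List Char) : List Char × List Char :=
  if 'a' ∉ alphabet ∨ 'A' ∉ alphabet then (PySem.Chars.upper s, PySem.Chars.upper alphabet)
  else (s, alphabet)

-- helper constHorizontal, shared module-level helper of both Pythons
def constHorizontalL (cle : List Char) (alphabet : List Char) : List Char :=
  let cle2 := pvDedup cle
  let p := pvCaseFold cle2 alphabet
  pvDedup (p.1 ++ p.2)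

def constVertical (cle : String) (alphabet : String) : String :=
  let _cle2 := pvDedup cle.toList        -- A computes cle2 and never uses it
  let p := pvCaseFold cle.toList alphabet.toList
  let alphaH := constHorizontalL p.1 p.2
  let c := p.1.length
  String.mk ((PySem.List.pyRange 0 (c : Int) 1).foldl (fun acc i =>
    (PySem.List.pyRange i (alphaH.length : Int) (c : Int)).foldl
      (fun acc2 j => acc2 ++ (PySem.List.pyGet? alphaH j).toList) acc) [])

-- ===== PORT B =====
def constVertical_alt (cle : String) (alphabet : String) : String :=
  let p := pvCaseFold cle.toList alphabet.toList
  let alphaH := constHorizontalL p.1 p.2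
  let c := p.1.length
  if c = 0 then "" else
  let rows := (PySem.List.pyRange 0 (alphaH.length : Int) (c : Int)).map
    (fun k => PySem.List.slice alphaH (some k) (some (k + (c : Int))))
  String.mk ((List.range c).flatMap (fun i => rows.filterMap (fun row => row[i]?)))

-- ===== PRECONDITION & SPEC =====
def Spec_constVertical (cle : String) (alphabet : String) (out : String) : Prop := out = constVertical_alt cle alphabet
instance (cle : String) (alphabet : String) (out : String) : Decidable (Spec_constVertical cle alphabet out) := by unfold Spec_constVertical; infer_instance

-- ===== CLAIM (what is proved, stated in full; the proofs are below) =====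
def Claim_equal_constVertical : Prop := ∀ (cle : String) (alphabet : String), Dom_constVertical cle alphabet → Spec_constVertical cle alphabet (constVertical cle alphabet)

-- ===== LEMMAS AND PROOFS =====

-- the grid of row slices, as a structural recursion (fuel = an upper bound on L.length)
def pvChunks (c : Nat) : Nat → List Char → List (List Char)
  | 0, _ => []
  | _ + 1, [] => []
  | n + 1, L => L.take c :: pvChunks c n (L.drop c)

theorem pvChunks_nil (c n : Nat) : pvChunks c n [] = [] := by cases n <;> rfl

theorem pvChunks_cons (c n : Nat) (L : List Char) (hL : L ≠ []) :
    pvChunks c (n + 1) L = L.take c :: pvChunks c n (L.drop c) := by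
  cases L with
  | nil => exact absurd rfl hL
  | cons x xs => rfl

theorem pvRange_nil (a b s : Int) (hs : 0 < s) (h : b ≤ a) : PySem.List.pyRange a b s = [] := by
  rw [PySem.List.pyRange_of_pos _ _ hs, if_neg (not_lt.mpr h)]
  simp

theorem pvRange_cons (a b s : Int) (hs : 0 < s) (h : a < b) :
    PySem.List.pyRange a b s = a :: PySem.List.pyRange (a + s) b s := by
  rw [PySem.List.pyRange_of_pos _ _ hs, PySem.List.pyRange_of_pos _ _ hs, if_pos h]
  have hnum : b - a + s - 1 = (b - a - 1) + 1 * s := by ring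
  have hdiv : (b - a + s - 1) / s = (b - a - 1) / s + 1 := by
    rw [hnum, Int.add_mul_ediv_right _ _ (by omega : s ≠ 0)]
  have hq0 : 0 ≤ (b - a - 1) / s := Int.ediv_nonneg (by omega) (by omega)
  have htn : ((b - a - 1) / s + 1).toNat = ((b - a - 1) / s).toNat + 1 := by omega
  rw [hdiv, htn, List.range_succ_eq_map]
  simp only [List.map_cons, List.map_map, Nat.cast_zero, mul_zero, add_zero]
  congr 1
  by_cases h2 : a + s < b
  · rw [if_pos h2]
    have hbb : b - (a + s) + s - 1 = b - a - 1 := by ring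
    rw [hbb]
    apply List.map_congr_left
    intro k _
    simp only [Function.comp]
    push_cast
    ring
  · rw [if_neg h2]
    have hz : (b - a - 1) / s = 0 := Int.ediv_eq_zero_of_lt (by omega) (by omega)
    rw [hz]
    simp

theorem pvRange_shift (a b d s : Int) (hs : 0 < s) :
    PySem.List.pyRange (a + d) (b + d) s = (PySem.List.pyRange a b s).map (· + d) := by
  rw [PySem.List.pyRange_of_pos _ _ hs, PySem.List.pyRange_of_pos _ _ hs, List.map_map]
  have h1 : b + d - (a + d) = b - a := by ring
  by_cases hab : a < b
  · rw [if_pos (by omega), if_pos hab, h1]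
    apply List.map_congr_left
    intro k _
    simp only [Function.comp]
    ring
  · rw [if_neg (by omega), if_neg hab]
    simp

theorem pvGet_shift (L : List Char) (c : Nat) (k : Int) (hk : 0 ≤ k) :
    PySem.List.pyGet? L (k + (c : Int)) = PySem.List.pyGet? (L.drop c) k := by
  obtain ⟨k', rfl⟩ := Int.eq_ofNat_of_zero_le hk
  rw [show ((k' : Int) + c) = ((k' + c : Nat) : Int) from (Nat.cast_add k' c).symm]
  rw [PySem.List.pyGet?_natCast, PySem.List.pyGet?_natCast, List.getElem?_drop,
    Nat.add_comm c k']

theorem pvSlice_shift (L : List Char) (c : Nat) (k : Int) (hk : 0 ≤ k) :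
    PySem.List.slice L (some (k + (c : Int))) (some (k + (c : Int) + (c : Int)))
      = PySem.List.slice (L.drop c) (some k) (some (k + (c : Int))) := by
  obtain ⟨k', rfl⟩ := Int.eq_ofNat_of_zero_le hk
  rw [PySem.List.slice_natCast_add (L.drop c) k' c]
  rw [show ((k' : Int) + c) = ((k' + c : Nat) : Int) from (Nat.cast_add k' c).symm]
  rw [PySem.List.slice_natCast_add L (k' + c) c, List.drop_drop, Nat.add_comm c k']

theorem pvRows_eq (c : Nat) (hc : 0 < c) : ∀ (n : Nat) (L : List Char), L.length ≤ n →
    (PySem.List.pyRange 0 (L.length : Int) (c : Int)).map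
      (fun k => PySem.List.slice L (some k) (some (k + (c : Int)))) = pvChunks c n L := by
  have hcz : (0 : Int) < (c : Int) := by exact_mod_cast hc
  intro n
  induction n with
  | zero =>
    intro L h
    have hL : L = [] := List.eq_nil_of_length_eq_zero (Nat.le_zero.mp h)
    subst hL
    simp only [List.length_nil, Nat.cast_zero, pvChunks_nil]
    rw [pvRange_nil 0 0 c hcz le_rfl]
    rfl
  | succ n ih =>
    intro L h
    by_cases hL : L = []
    · subst hL
      simp only [List.length_nil, Nat.cast_zero, pvChunks_nil]
      rw [pvRange_nil 0 0 c hcz le_rfl]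
      rfl
    · have hlen : 0 < L.length := List.length_pos_iff.mpr hL
      rw [pvRange_cons 0 _ _ hcz (by exact_mod_cast hlen), List.map_cons, pvChunks_cons c n L hL]
      congr 1
      · simp
      · rw [← ih (L.drop c) (by rw [List.length_drop]; omega), List.length_drop]
        by_cases hcl : c ≤ L.length
        · have hb : (L.length : Int) = ((L.length - c : Nat) : Int) + c := by omega
          rw [hb, pvRange_shift 0 _ (c : Int) _ hcz, List.map_map]
          apply List.map_congr_left
          intro k hk
          have hk0 : 0 ≤ k := by
            have := (PySem.List.mem_pyRange_iff_of_pos hcz k).mp hk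
            omega
          simpa using pvSlice_shift L c k hk0
        · have h1 : L.length - c = 0 := by omega
          rw [h1]
          simp only [Nat.cast_zero]
          rw [pvRange_nil 0 0 c hcz le_rfl,
            pvRange_nil (0 + (c : Int)) _ _ hcz (by omega)]
          rfl

theorem pvCol_eq (c i : Nat) (hc : 0 < c) (hi : i < c) : ∀ (n : Nat) (L : List Char), L.length ≤ n →
    (PySem.List.pyRange (i : Int) (L.length : Int) (c : Int)).flatMap
      (fun j => (PySem.List.pyGet? L j).toList)
      = (pvChunks c n L).filterMap (fun row => row[i]?) := by
  have hcz : (0 : Int) < (c : Int) := by exact_mod_cast hc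
  have hiz : (0 : Int) ≤ (i : Int) := by exact_mod_cast Nat.zero_le i
  intro n
  induction n with
  | zero =>
    intro L h
    have hL : L = [] := List.eq_nil_of_length_eq_zero (Nat.le_zero.mp h)
    subst hL
    simp only [List.length_nil, Nat.cast_zero, pvChunks_nil]
    rw [pvRange_nil _ 0 c hcz hiz]
    rfl
  | succ n ih =>
    intro L h
    by_cases hL : L = []
    · subst hL
      simp only [List.length_nil, Nat.cast_zero, pvChunks_nil]
      rw [pvRange_nil _ 0 c hcz hiz]
      rfl
    · rw [pvChunks_cons c n L hL, List.filterMap_cons,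
        List.getElem?_take, if_pos hi,
        ← ih (L.drop c) (by rw [List.length_drop]; omega), List.length_drop]
      by_cases hil : i < L.length
      · rw [List.getElem?_eq_getElem hil]
        rw [pvRange_cons _ _ _ hcz (by exact_mod_cast hil), List.flatMap_cons,
          PySem.List.pyGet?_natCast, List.getElem?_eq_getElem hil]
        simp only [Option.toList_some, List.singleton_append]
        congr 1
        by_cases hcl : c ≤ L.length
        · have hb : (L.length : Int) = ((L.length - c : Nat) : Int) + c := by omega
          rw [hb, pvRange_shift _ _ (c : Int) _ hcz, List.flatMap_map]
          apply List.flatMap_congr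
          intro k hk
          have hk0 : 0 ≤ k := by
            have := (PySem.List.mem_pyRange_iff_of_pos hcz k).mp hk
            omega
          rw [pvGet_shift L c k hk0]
        · have h1 : L.length - c = 0 := by omega
          rw [h1]
          simp only [Nat.cast_zero]
          rw [pvRange_nil _ 0 c hcz hiz,
            pvRange_nil ((i : Int) + c) _ _ hcz (by omega)]
          rfl
      · rw [pvRange_nil _ _ _ hcz (by exact_mod_cast not_lt.mp hil),
          List.getElem?_eq_none (not_lt.mp hil),
          pvRange_nil _ _ _ hcz (by omega)]
        rfl

-- ===== VERDICT (by name: the statement is the Claim_ definition above) =====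
theorem constVertical_spec : Claim_equal_constVertical := by
  intro cle alphabet _
  unfold Spec_constVertical constVertical constVertical_alt
  dsimp only
  set p := pvCaseFold cle.toList alphabet.toList with hp
  set L := constHorizontalL p.1 p.2 with hL
  set c := p.1.length with hc
  by_cases h0 : c = 0
  · rw [if_pos h0, h0]
    simp only [Nat.cast_zero]
    rw [pvRange_nil 0 0 1 one_pos le_rfl]
    rfl
  · rw [if_neg h0]
    have hcpos : 0 < c := Nat.pos_of_ne_zero h0
    apply congrArg String.mk
    simp only [PySem.List.foldl_append_eq_flatMap, List.nil_append]
    rw [PySem.List.pyRange_zero_natCast c, List.flatMap_map]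
    rw [pvRows_eq c hcpos L.length L le_rfl]
    apply List.flatMap_congr
    intro i hi
    have hi' : i < c := List.mem_range.mp hi
    exact pvCol_eq c i hcpos hi' L.length L le_rfl
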